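-- pv_equiv track=rewrite | github.com/MrBrantCode/unitest_baseline | mut_generate/mist_train_taco/taco_17449/solution.py | longest_non_negative_subarray_length
-- ===== SOURCE A (Python) =====
-- def longest_non_negative_subarray_length(A, N):
--     A.append(-1)  # Append a negative number to handle the edge case
--     curr = 0
--     ans = 0
--     for x in A:
--         if x < 0:
--             curr = 0
--         else:
--             curr += 1
--         ans = max(curr, ans)
--     return ans
-- ===== SOURCE B (Python) =====
-- def longest_non_negative_subarray_length(A, N):
--     A.append(-1)  # preserve A's in-place mutation (same side effect as A)
--     best = 0
--     i = 0
--     n = len(A)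
--     while i < n:
--         if A[i] < 0:
--             i += 1
--         else:
--             j = i + 1
--             while j < n and A[j] >= 0:
--                 j += 1
--             run = j - i
--             if run > best:
--                 best = run
--             i = j
--     return best
-- ===== Notes on version B (the rewrite author's own statement) =====
-- stated objective: alternative
-- what changed: Replaces the per-element running-counter-and-max scan with a two-pointer run scan that jumps over each maximal non-negative block and takes one max per block (the A.append(-1) mutation is preserved).
import Mathlib
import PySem

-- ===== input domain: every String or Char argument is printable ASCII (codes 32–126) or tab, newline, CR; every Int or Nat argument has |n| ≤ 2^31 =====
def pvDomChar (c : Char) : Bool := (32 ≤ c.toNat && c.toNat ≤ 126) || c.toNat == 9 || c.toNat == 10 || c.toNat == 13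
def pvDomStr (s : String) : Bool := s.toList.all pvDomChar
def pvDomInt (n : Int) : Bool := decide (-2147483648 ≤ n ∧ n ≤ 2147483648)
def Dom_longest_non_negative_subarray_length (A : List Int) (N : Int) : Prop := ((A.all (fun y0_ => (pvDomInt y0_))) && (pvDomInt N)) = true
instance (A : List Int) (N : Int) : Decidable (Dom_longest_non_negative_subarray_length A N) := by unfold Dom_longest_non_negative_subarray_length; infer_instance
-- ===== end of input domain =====

-- B replaces A's per-element running-counter scan by a two-pointer maximal-run scan (same O(n) cost);
-- both programs also append -1 to the caller's list A, the theorem is about the return value.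


-- ===== PORT A =====
-- A's for-loop over A (after the append of -1) with state (curr, ans)
def goA : List Int → Int × Int → Int × Int
  | [], s => s
  | x :: xs, (curr, ans) =>
      let c : Int := if x < 0 then 0 else curr + 1
      goA xs (c, max c ans)

def longest_non_negative_subarray_length (A : List Int) (N : Int) : Int :=
  (goA (A ++ [-1]) (0, 0)).2

-- ===== PORT B =====
-- length of the leading run of non-negatives, and the remainder of the list
-- (this is B's inner `while j < n and A[j] >= 0` pointer advance)
def runNN : List Int → Int × List Int
  | [] => (0, [])
  | x :: xs =>
      if x < 0 then (0, x :: xs)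
      else
        let (c, r) := runNN xs
        (c + 1, r)

theorem runNN_len_le : ∀ (l : List Int), (runNN l).2.length ≤ l.length := by
  intro l
  induction l with
  | nil => simp [runNN]
  | cons x xs ih =>
      by_cases h : x < 0
      · simp [runNN, h]
      · simp only [runNN, h, if_false]
        simp only [List.length_cons]
        exact Nat.le_succ_of_le ih

-- B's outer while-loop: skip a negative, or take a whole run and one max
def goB : List Int → Int → Int
  | [], best => best
  | x :: xs, best =>
      if x < 0 then goB xs best
      else goB (runNN xs).2 (max best ((runNN xs).1 + 1))
termination_by l _ => l.length
decreasing_by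
  · simp
  · have := runNN_len_le xs
    simp only [List.length_cons]
    omega

def longest_non_negative_subarray_length_alt (A : List Int) (N : Int) : Int :=
  goB (A ++ [-1]) 0

-- ===== PRECONDITION & SPEC =====
def Spec_longest_non_negative_subarray_length (A : List Int) (N : Int) (out : Int) : Prop := out = longest_non_negative_subarray_length_alt A N
instance (A : List Int) (N : Int) (out : Int) : Decidable (Spec_longest_non_negative_subarray_length A N out) := by unfold Spec_longest_non_negative_subarray_length; infer_instance

-- ===== CLAIM (what is proved, stated in full; the proofs are below) =====
def Claim_equal_longest_non_negative_subarray_length : Prop := ∀ (A : List Int) (N : Int), Dom_longest_non_negative_subarray_length A N → Spec_longest_non_negative_subarray_length A N (longest_non_negative_subarray_length A N)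

-- ===== LEMMAS AND PROOFS =====

theorem runNN_fst_nonneg : ∀ (l : List Int), 0 ≤ (runNN l).1 := by
  intro l
  induction l with
  | nil => simp [runNN]
  | cons x xs ih =>
      by_cases h : x < 0 <;> simp [runNN, h]
      omega

-- the `ans` accumulator of A's loop factors through max
theorem goA_max : ∀ (l : List Int) (curr a b : Int),
    (goA l (curr, max a b)).2 = max a (goA l (curr, b)).2 := by
  intro l
  induction l with
  | nil => intro curr a b; simp [goA]
  | cons x xs ih =>
      intro curr a b
      simp only [goA]
      rw [max_left_comm, ih]

-- A's scan from state (c, c) computes c plus the leading run, maxed with the rest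
theorem goA_run : ∀ (l : List Int) (c : Int), 0 ≤ c →
    (goA l (c, c)).2 = max (c + (runNN l).1) ((goA (runNN l).2 (0, 0)).2) := by
  intro l
  induction l with
  | nil => intro c hc; simp [goA, runNN]; omega
  | cons x xs ih =>
      intro c hc
      by_cases h : x < 0
      · simp only [goA, runNN, h, if_pos]
        have h0 : (max (0 : Int) c) = max c 0 := max_comm _ _
        simp only [h0, goA_max]
        omega
      · have hm : max (c + 1) c = c + 1 := by omega
        have hA : goA (x :: xs) (c, c) = goA xs (c + 1, c + 1) := by
          simp only [goA, h, if_false, hm]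
        have hr1 : (runNN (x :: xs)).1 = (runNN xs).1 + 1 := by
          simp only [runNN, h, if_false]
        have hr2 : (runNN (x :: xs)).2 = (runNN xs).2 := by
          simp only [runNN, h, if_false]
        rw [hA, ih (c + 1) (by omega), hr1, hr2]
        ring_nf

-- B's loop equals `max best` of A's scan value
theorem goB_eq : ∀ (n : Nat) (l : List Int), l.length ≤ n → ∀ (best : Int), 0 ≤ best →
    goB l best = max best ((goA l (0, 0)).2) := by
  intro n
  induction n with
  | zero =>
      intro l hl best hb
      have : l = [] := by
        cases l with
        | nil => rfl
        | cons y ys => simp at hl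
      subst this; simp [goB, goA]; omega
  | succ n ih =>
      intro l hl best hb
      cases l with
      | nil => simp [goB, goA]; omega
      | cons x xs =>
          by_cases h : x < 0
          · simp only [goB, h, if_pos]
            rw [ih xs (by simp at hl; omega) best hb]
            simp only [goA, h, if_pos]
            simp
          · simp only [goB, h, if_false]
            have hr := runNN_len_le xs
            have hlen : (runNN xs).2.length ≤ n := by simp at hl; omega
            have hk := runNN_fst_nonneg xs
            rw [ih _ hlen _ (by omega)]
            simp only [goA]
            have h1 : (if x < 0 then (0:Int) else 0 + 1) = 1 := by simp [h]
            simp only [h1]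
            have h2 : (max (1:Int) 0) = 1 := by omega
            simp only [h2]
            rw [goA_run xs 1 (by omega)]
            have := (goA (runNN xs).2 (0, 0)).2
            rw [max_assoc]
            congr 1
            omega

theorem goA_eq_goB (l : List Int) : goB l 0 = (goA l (0, 0)).2 := by
  rw [goB_eq l.length l (le_refl _) 0 (le_refl _)]
  have : 0 ≤ (goA l (0, 0)).2 := by
    suffices h : ∀ (m : List Int) (c a : Int), 0 ≤ a → 0 ≤ (goA m (c, a)).2 by
      exact h l 0 0 (le_refl _)
    intro m
    induction m with
    | nil => intro c a ha; simpa [goA]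
    | cons x xs ih =>
        intro c a ha
        simp only [goA]
        exact ih _ _ (by omega)
  omega

-- ===== VERDICT (by name: the statement is the Claim_ definition above) =====
theorem longest_non_negative_subarray_length_spec : Claim_equal_longest_non_negative_subarray_length := by
  intro A N _
  unfold Spec_longest_non_negative_subarray_length
  unfold longest_non_negative_subarray_length longest_non_negative_subarray_length_alt
  rw [goA_eq_goB]
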